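-- pv_equiv track=rewrite | github.com/edoriggio/algorithms-and-data-structures | exercises/ex_196.py | linear_algo_x
-- ===== SOURCE A (Python) =====
-- def linear_algo_x(A):
--     max_dist = 0
--     start = 0
--
--     for i in range(1, len(A)):
--         if A[i] < A[i-1]:
--             if A[i-1] - A[start] > max_dist:
--                 max_dist = A[i-1] - A[start]
--
--             start = i
--
--     return max_dist
-- ===== SOURCE B (Python) =====
-- def linear_algo_x(A):
--     # Pass 1: split A into maximal non-decreasing runs, keeping (first, last)
--     # of each COMPLETED run; the trailing run is never completed (no descent
--     # follows it), which is exactly why A never scores it.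
--     runs = []
--     if A:
--         first = A[0]
--         prev = A[0]
--         for x in A[1:]:
--             if x < prev:
--                 runs.append((first, prev))
--                 first = x
--             prev = x
--     # Pass 2: best rise over completed runs.
--     best = 0
--     for f, l in runs:
--         if l - f > best:
--             best = l - f
--     return best
-- ===== Notes on version B (the rewrite author's own statement) =====
-- stated objective: alternative
-- what changed: Replaces the single index-based scan that tracks a start index and scores on each descent with a two-pass run decomposition: first build the (first,last) pairs of the completed non-decreasing runs, then take the best rise over those pairs.
import Mathlib
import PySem

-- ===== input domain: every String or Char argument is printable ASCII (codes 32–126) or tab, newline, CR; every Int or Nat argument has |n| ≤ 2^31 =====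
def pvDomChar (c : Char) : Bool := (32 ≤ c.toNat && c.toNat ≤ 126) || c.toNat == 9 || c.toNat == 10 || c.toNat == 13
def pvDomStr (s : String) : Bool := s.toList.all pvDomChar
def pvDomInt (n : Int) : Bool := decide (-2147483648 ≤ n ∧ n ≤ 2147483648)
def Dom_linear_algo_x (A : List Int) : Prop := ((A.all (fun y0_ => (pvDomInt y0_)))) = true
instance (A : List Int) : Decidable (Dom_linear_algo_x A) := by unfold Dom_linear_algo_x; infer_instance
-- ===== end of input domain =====

-- B replaces A's single index scan by a two-pass run decomposition (same O(n) cost); return values proved equal on all inputs.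

-- ===== PORT A =====
-- loop body of A: state (max_dist, start), loop variable i
def pvStepA (A : List Int) (st : Int × Int) (i : Int) : Int × Int :=
  if PySem.List.pyGetD A i 0 < PySem.List.pyGetD A (i - 1) 0 then
    (if PySem.List.pyGetD A (i - 1) 0 - PySem.List.pyGetD A st.2 0 > st.1 then
        PySem.List.pyGetD A (i - 1) 0 - PySem.List.pyGetD A st.2 0
      else st.1, i)
  else st

def linear_algo_x (A : List Int) : Int :=
  ((PySem.List.pyRange 1 (A.length : Int) 1).foldl (pvStepA A) ((0 : Int), (0 : Int))).1

-- ===== PORT B =====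
-- pass 1 of B: the completed non-decreasing runs of (first :: prev :: rest), as (first, last) pairs
def pvRuns (first prev : Int) : List Int → List (Int × Int)
  | [] => []
  | x :: xs => if x < prev then (first, prev) :: pvRuns x x xs else pvRuns first x xs

def linear_algo_x_alt (A : List Int) : Int :=
  let runs : List (Int × Int) :=
    match A with
    | [] => []
    | a :: rest => pvRuns a a rest
  runs.foldl (fun best q => if q.2 - q.1 > best then q.2 - q.1 else best) 0

-- ===== PRECONDITION & SPEC =====
def Spec_linear_algo_x (A : List Int) (out : Int) : Prop := out = linear_algo_x_alt A
instance (A : List Int) (out : Int) : Decidable (Spec_linear_algo_x A out) := by unfold Spec_linear_algo_x; infer_instance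

-- ===== CLAIM (what is proved, stated in full; the proofs are below) =====
def Claim_equal_linear_algo_x : Prop := ∀ (A : List Int), Dom_linear_algo_x A → Spec_linear_algo_x A (linear_algo_x A)

-- ===== LEMMAS AND PROOFS =====

-- value-level version of A's loop body: state (max_dist, first-of-run), input the pair (A[i-1], A[i])
def pvStep2 (st : Int × Int) (pr : Int × Int) : Int × Int :=
  if pr.2 < pr.1 then
    (if pr.1 - st.2 > st.1 then pr.1 - st.2 else st.1, pr.2)
  else st

-- consecutive pairs of a list
def pvPairs : List Int → List (Int × Int)
  | [] => []
  | [_] => []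
  | a :: b :: t => (a, b) :: pvPairs (b :: t)

theorem pvPairs_snoc (A : List Int) (a y : Int) :
    pvPairs (a :: (A ++ [y])) = pvPairs (a :: A) ++ [(List.getLastD A a, y)] := by
  induction A generalizing a with
  | nil => simp [pvPairs]
  | cons b t ih =>
      simp only [List.cons_append, pvPairs, ih b]
      simp [List.getLast?_cons, List.getLastD_eq_getLast?]

-- fold of pvStep2 over consecutive pairs = B's two passes, with running best m
theorem pvfold_eq_runs (xs : List Int) (p f m : Int) :
    ((pvPairs (p :: xs)).foldl pvStep2 (m, f)).1 =
      (pvRuns f p xs).foldl (fun best q => if q.2 - q.1 > best then q.2 - q.1 else best) m := by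
  induction xs generalizing p f m with
  | nil => simp [pvPairs, pvRuns]
  | cons x xs ih =>
      by_cases h : x < p
      · simp [pvPairs, pvRuns, pvStep2, h, List.foldl_cons, ih]
      · simp [pvPairs, pvRuns, pvStep2, h, List.foldl_cons, ih]

theorem pvGetD_append_left (xs ys : List Int) (i : Int) (h0 : 0 ≤ i) (h : i < (xs.length : Int)) :
    PySem.List.pyGetD (xs ++ ys) i 0 = PySem.List.pyGetD xs i 0 := by
  rw [PySem.List.pyGetD_eq_getElem (xs ++ ys) 0 h0 (by simp; omega),
      PySem.List.pyGetD_eq_getElem xs 0 h0 (by simpa using h)]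
  exact List.getElem_append_left (by omega)

theorem pvGetD_append_mid (xs ys : List Int) (y : Int) :
    PySem.List.pyGetD (xs ++ y :: ys) (xs.length : Int) 0 = y := by
  rw [PySem.List.pyGetD_eq_getElem (xs ++ y :: ys) 0 (by positivity) (by simp)]
  simp

theorem pvGetD_last (A : List Int) (a : Int) :
    PySem.List.pyGetD (a :: A) (((a :: A).length : Int) - 1) 0 = List.getLastD A a := by
  induction A using List.reverseRecOn with
  | nil => norm_num [PySem.List.pyGetD_zero_cons]
  | append_singleton s z _ =>
      have h1 : a :: (s ++ [z]) = (a :: s) ++ z :: [] := by simp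
      have h2 : (((a :: (s ++ [z])).length : Int)) - 1 = (((a :: s).length : Int)) := by
        simp
      rw [h2, h1, pvGetD_append_mid (a :: s) [] z]
      simp

-- main invariant: A's index fold over any prefix (a :: A) of the full list (a :: A) ++ ext
-- computes the same max as the value fold, and its start index points at the current run's first value
theorem pvMain (A : List Int) : ∀ (ext : List Int) (a : Int),
    (((PySem.List.pyRange 1 (((a :: A).length : Int)) 1).foldl
        (pvStepA ((a :: A) ++ ext)) ((0 : Int), (0 : Int))).1 =
      ((pvPairs (a :: A)).foldl pvStep2 ((0 : Int), a)).1) ∧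
    (0 ≤ ((PySem.List.pyRange 1 (((a :: A).length : Int)) 1).foldl
        (pvStepA ((a :: A) ++ ext)) ((0 : Int), (0 : Int))).2) ∧
    (((PySem.List.pyRange 1 (((a :: A).length : Int)) 1).foldl
        (pvStepA ((a :: A) ++ ext)) ((0 : Int), (0 : Int))).2 < ((a :: A).length : Int)) ∧
    (PySem.List.pyGetD ((a :: A) ++ ext)
        (((PySem.List.pyRange 1 (((a :: A).length : Int)) 1).foldl
          (pvStepA ((a :: A) ++ ext)) ((0 : Int), (0 : Int))).2) 0 =
      ((pvPairs (a :: A)).foldl pvStep2 ((0 : Int), a)).2) := by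
  induction A using List.reverseRecOn with
  | nil =>
      intro ext a
      rw [PySem.List.pyRange_one_eq_nil (by simp)]
      refine ⟨by simp [pvPairs], by simp, by simp, ?_⟩
      simp [pvPairs, PySem.List.pyGetD_zero_cons]
  | append_singleton A y ih =>
      intro ext a
      have hge : (1 : Int) ≤ (((a :: A).length : Int)) := by
        simp only [List.length_cons]; push_cast; omega
      have hlen : (((a :: (A ++ [y])).length : Int)) = (((a :: A).length : Int)) + 1 := by
        simp
      have hassoc : (a :: (A ++ [y])) ++ ext = (a :: A) ++ ([y] ++ ext) := by simp
      rw [hlen, PySem.List.pyRange_one_succ_right hge, List.foldl_append, hassoc,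
        pvPairs_snoc, List.foldl_append]
      obtain ⟨h1, h2, h3, h4⟩ := ih ([y] ++ ext) a
      set r := (PySem.List.pyRange 1 (((a :: A).length : Int)) 1).foldl
        (pvStepA ((a :: A) ++ ([y] ++ ext))) ((0 : Int), (0 : Int)) with hr
      set q := (pvPairs (a :: A)).foldl pvStep2 ((0 : Int), a) with hq
      have hgy : PySem.List.pyGetD ((a :: A) ++ ([y] ++ ext)) (((a :: A).length : Int)) 0 = y := by
        simpa using pvGetD_append_mid (a :: A) ext y
      have hglast : PySem.List.pyGetD ((a :: A) ++ ([y] ++ ext)) ((((a :: A).length : Int)) - 1) 0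
          = List.getLastD A a := by
        rw [pvGetD_append_left _ _ _ (by simp) (by omega), pvGetD_last]
      have hA : pvStepA ((a :: A) ++ ([y] ++ ext)) r (((a :: A).length : Int)) =
          (if y < List.getLastD A a then
            (if List.getLastD A a - q.2 > q.1 then List.getLastD A a - q.2 else q.1,
              (((a :: A).length : Int)))
          else r) := by
        unfold pvStepA
        rw [hgy, hglast, h4, h1]
      have hB : pvStep2 q (List.getLastD A a, y) =
          (if y < List.getLastD A a then
            (if List.getLastD A a - q.2 > q.1 then List.getLastD A a - q.2 else q.1, y)
          else q) := rfl
      simp only [List.foldl_cons, List.foldl_nil, hA, hB]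
      by_cases h : y < List.getLastD A a
      · rw [if_pos h, if_pos h]
        exact ⟨rfl, by exact Int.natCast_nonneg _, by exact lt_add_one _, hgy⟩
      · rw [if_neg h, if_neg h]
        exact ⟨h1, h2, by omega, h4⟩

-- ===== VERDICT (by name: the statement is the Claim_ definition above) =====
theorem linear_algo_x_spec : Claim_equal_linear_algo_x := by
  intro A _
  unfold Spec_linear_algo_x linear_algo_x linear_algo_x_alt
  cases A with
  | nil => simp [PySem.List.pyRange_one_eq_nil]
  | cons a rest =>
      have h := (pvMain rest [] a).1
      rw [List.append_nil] at h
      rw [h, pvfold_eq_runs]
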